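-- pv_equiv track=rewrite | github.com/xmasterchiaf/MAnosov | gost.py | psiN
-- ===== SOURCE A (Python) =====
-- def psiN(Y, n):
--     for i in range(n):
--         tmp = [0, 0]
--         for j in [1, 2, 3, 4, 13, 16]:
--             tmp[0] ^= Y[2 * (j - 1)]
--             tmp[1] ^= Y[2 * (j - 1) + 1]
--         Y = Y[2:] + tmp
--     return Y
-- ===== SOURCE B (Python) =====
-- def psiN(Y, n):
--     if n <= 0:
--         return Y
--     s = list(Y)
--     for t in range(n):
--         b = 2 * t
--         s.append(s[b] ^ s[b + 2] ^ s[b + 4] ^ s[b + 6] ^ s[b + 24] ^ s[b + 30])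
--         s.append(s[b + 1] ^ s[b + 3] ^ s[b + 5] ^ s[b + 7] ^ s[b + 25] ^ s[b + 31])
--     return s[2 * n:]
-- ===== Notes on version B (the rewrite author's own statement) =====
-- stated objective: faster
-- what changed: Instead of rebuilding the 32+-element window with Y[2:]+tmp on every iteration, B appends the two new tap-xor values to one growing buffer and returns a single final slice s[2n:], making each step O(1) instead of O(len(Y)).
import Mathlib
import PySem

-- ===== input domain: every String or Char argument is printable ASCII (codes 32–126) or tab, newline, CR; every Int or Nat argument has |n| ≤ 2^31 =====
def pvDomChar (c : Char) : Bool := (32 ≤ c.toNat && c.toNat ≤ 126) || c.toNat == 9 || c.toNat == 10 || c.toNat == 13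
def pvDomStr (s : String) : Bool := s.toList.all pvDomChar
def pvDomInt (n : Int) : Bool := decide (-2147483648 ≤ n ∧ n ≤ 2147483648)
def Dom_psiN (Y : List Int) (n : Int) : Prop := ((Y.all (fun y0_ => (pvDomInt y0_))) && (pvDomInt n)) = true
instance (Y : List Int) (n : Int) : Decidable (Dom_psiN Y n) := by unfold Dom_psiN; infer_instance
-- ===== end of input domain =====

-- B replaces A's per-step window re-slicing by one growing buffer (append two taps per
-- step, slice once at the end): O(n + |Y|) work instead of A's O(n·|Y|).

-- ===== PORT A =====
-- one iteration of A's loop body: tmp-pair of xors over the tap list, then Y = Y[2:] + tmp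
def psiNstep (Y : List Int) : List Int :=
  let tmp := List.foldl
    (fun (tmp : Int × Int) (j : Int) =>
      (PySem.Int.bxor tmp.1 (PySem.List.pyGetD Y (2 * (j - 1)) 0),
       PySem.Int.bxor tmp.2 (PySem.List.pyGetD Y (2 * (j - 1) + 1) 0)))
    (0, 0) [1, 2, 3, 4, 13, 16]
  PySem.List.slice Y (some 2) none ++ [tmp.1, tmp.2]

def psiN (Y : List Int) (n : Int) : List Int :=
  List.foldl (fun Y _ => psiNstep Y) Y (PySem.List.pyRange 0 n 1)

-- ===== PORT B =====
-- one iteration of B's loop body: two appends to the growing buffer s (b = 2*t)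
def psiNbody (s : List Int) (t : Int) : List Int :=
  let b : Int := 2 * t
  let s1 := s ++ [PySem.Int.bxor (PySem.Int.bxor (PySem.Int.bxor (PySem.Int.bxor
      (PySem.Int.bxor (PySem.List.pyGetD s b 0) (PySem.List.pyGetD s (b + 2) 0))
      (PySem.List.pyGetD s (b + 4) 0)) (PySem.List.pyGetD s (b + 6) 0))
      (PySem.List.pyGetD s (b + 24) 0)) (PySem.List.pyGetD s (b + 30) 0)]
  s1 ++ [PySem.Int.bxor (PySem.Int.bxor (PySem.Int.bxor (PySem.Int.bxor
      (PySem.Int.bxor (PySem.List.pyGetD s1 (b + 1) 0) (PySem.List.pyGetD s1 (b + 3) 0))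
      (PySem.List.pyGetD s1 (b + 5) 0)) (PySem.List.pyGetD s1 (b + 7) 0))
      (PySem.List.pyGetD s1 (b + 25) 0)) (PySem.List.pyGetD s1 (b + 31) 0)]

def psiN_alt (Y : List Int) (n : Int) : List Int :=
  if n ≤ 0 then Y
  else
    let s := List.foldl psiNbody Y (PySem.List.pyRange 0 n 1)
    PySem.List.slice s (some (2 * n)) none

-- ===== PRECONDITION & SPEC =====
-- Pre_ excludes exactly the inputs where A raises IndexError: a positive n with fewer than
-- 32 elements in Y (the loop body reads Y[31]).
def Pre_psiN (Y : List Int) (n : Int) : Prop := 0 < n → 32 ≤ Y.length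
instance (Y : List Int) (n : Int) : Decidable (Pre_psiN Y n) := by unfold Pre_psiN; infer_instance

def pvWitness_psiN : List Int × Int :=
  ([0, 1, 2, 3, 4, 5, 6, 7, 8, 9, 10, 11, 12, 13, 14, 15,
    16, 17, 18, 19, 20, 21, 22, 23, 24, 25, 26, 27, 28, 29, 30, 31], 2)

def Spec_psiN (Y : List Int) (n : Int) (out : List Int) : Prop := out = psiN_alt Y n
instance (Y : List Int) (n : Int) (out : List Int) : Decidable (Spec_psiN Y n out) := by unfold Spec_psiN; infer_instance

-- ===== CLAIM (what is proved, stated in full; the proofs are below) =====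
def Claim_equal_psiN : Prop := ∀ (Y : List Int) (n : Int), Dom_psiN Y n → Pre_psiN Y n → Spec_psiN Y n (psiN Y n)

-- ===== LEMMAS AND PROOFS =====

-- proof-side recursions equal to the two folds
def AIter (Y : List Int) : Nat → List Int
  | 0 => Y
  | t + 1 => psiNstep (AIter Y t)

def BIter (Y : List Int) : Nat → List Int
  | 0 => Y
  | t + 1 => psiNbody (BIter Y t) (t : Int)

lemma AIter_succ_left (Y : List Int) (t : Nat) :
    AIter (psiNstep Y) t = psiNstep (AIter Y t) := by
  induction t with
  | zero => rfl
  | succ t ih => simp [AIter, ih]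

lemma foldl_A (Y : List Int) (l : List Int) :
    List.foldl (fun Y _ => psiNstep Y) Y l = AIter Y l.length := by
  induction l generalizing Y with
  | nil => rfl
  | cons a l ih => simp [List.foldl, ih, AIter, AIter_succ_left]

lemma foldl_B (Y : List Int) (N : Nat) :
    List.foldl psiNbody Y (List.map (fun k : Nat => (k : Int)) (List.range N)) = BIter Y N := by
  induction N with
  | zero => rfl
  | succ N ih => simp [List.range_succ, List.foldl_append, ih, BIter]

lemma zero_bxor (a : Int) : PySem.Int.bxor 0 a = a := by
  rw [PySem.Int.bxor_comm]; exact PySem.Int.bxor_zero a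

lemma getD_drop (s : List Int) (t : Nat) (k : Int) (hk : 0 ≤ k) :
    PySem.List.pyGetD (s.drop (2 * t)) k 0 = PySem.List.pyGetD s (2 * (t : Int) + k) 0 := by
  rw [PySem.List.pyGetD_of_nonneg _ _ hk, PySem.List.pyGetD_of_nonneg _ _ (by positivity)]
  have h : (2 * (t : Int) + k).toNat = 2 * t + k.toNat := by omega
  simp [List.getD, List.getElem?_drop, h]

lemma getD_append_left (s u : List Int) (i : Int) (h0 : 0 ≤ i) (h : i.toNat < s.length) :
    PySem.List.pyGetD (s ++ u) i 0 = PySem.List.pyGetD s i 0 := by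
  rw [PySem.List.pyGetD_of_nonneg _ _ h0, PySem.List.pyGetD_of_nonneg _ _ h0]
  simp [List.getD, List.getElem?_append_left h]

lemma invariant (Y : List Int) (hL : 32 ≤ Y.length) (t : Nat) :
    AIter Y t = (BIter Y t).drop (2 * t) ∧ (BIter Y t).length = Y.length + 2 * t := by
  induction t with
  | zero => simp [AIter, BIter]
  | succ t ih =>
    obtain ⟨ihA, ihB⟩ := ih
    set s := BIter Y t with hs
    have hlen : 2 * t + 2 ≤ s.length := by omega
    constructor
    · show psiNstep (AIter Y t) = (psiNbody s (t : Int)).drop (2 * (t + 1))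
      rw [ihA]
      unfold psiNstep psiNbody
      simp only []
      rw [PySem.List.slice_from _ (by norm_num), List.drop_drop]
      -- rewrite every pyGetD on the appended buffers back to s
      rw [getD_append_left _ _ (2 * (t:Int) + 1) (by positivity) (by omega),
          getD_append_left _ _ (2 * (t:Int) + 3) (by positivity) (by omega),
          getD_append_left _ _ (2 * (t:Int) + 5) (by positivity) (by omega),
          getD_append_left _ _ (2 * (t:Int) + 7) (by positivity) (by omega),
          getD_append_left _ _ (2 * (t:Int) + 25) (by positivity) (by omega),
          getD_append_left _ _ (2 * (t:Int) + 31) (by positivity) (by omega)]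
      rw [List.append_assoc,
          List.drop_append_of_le_length (by omega : 2 * (t + 1) ≤ s.length)]
      simp only [List.foldl]
      norm_num [zero_bxor]
      rw [getD_drop s t 0 (by norm_num), getD_drop s t 2 (by norm_num),
          getD_drop s t 4 (by norm_num), getD_drop s t 6 (by norm_num),
          getD_drop s t 24 (by norm_num), getD_drop s t 30 (by norm_num),
          getD_drop s t 1 (by norm_num), getD_drop s t 3 (by norm_num),
          getD_drop s t 5 (by norm_num), getD_drop s t 7 (by norm_num),
          getD_drop s t 25 (by norm_num), getD_drop s t 31 (by norm_num)]
      norm_num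
      omega
    · show (psiNbody s (t : Int)).length = Y.length + 2 * (t + 1)
      simp [psiNbody]
      omega

-- ===== VERDICT (by name: the statement is the Claim_ definition above) =====
theorem psiN_spec : Claim_equal_psiN := by
  intro Y n _ hpre
  unfold Spec_psiN psiN psiN_alt
  by_cases hn : n ≤ 0
  · have : PySem.List.pyRange 0 n 1 = [] := by simp [PySem.List.pyRange]; omega
    simp [this, hn]
  · have hn' : 0 < n := by omega
    have hL := hpre hn'
    have hcast : n = ((n.toNat : Nat) : Int) := by omega
    rw [hcast, PySem.List.pyRange_zero_natCast, foldl_B, foldl_A]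
    rw [if_neg (by omega : ¬ ((n.toNat : Nat) : Int) ≤ 0)]
    rw [PySem.List.slice_from _ (by positivity)]
    have h2 : (2 * ((n.toNat : Nat) : Int)).toNat = 2 * n.toNat := by omega
    rw [h2]
    simpa using (invariant Y hL n.toNat).1
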